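-- pv_equiv track=rewrite | github.com/MitchPickGit/vic-building-rag | evaluate_ncc.py | matches_expected
-- ===== SOURCE A (Python) =====
-- def matches_expected(provision_id: str, expected_list: list[str]) -> bool:
--     """Did this provision_id match any of the expected provisions?
--     Match if exact, or if expected is a parent (e.g. expected 'H4P2'
--     matches retrieved 'H4P2(1)')."""
--     pid = provision_id.strip()
--     for exp in expected_list:
--         e = exp.strip()
--         if pid == e:
--             return True
--         # Parent match: expected 'H4P2' matches retrieved 'H4P2(1)' — strip subprov from pid
--         # and compare. The parent ID is pid up to the first '('.
--         bare = pid.split("(", 1)[0]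
--         if bare == e:
--             return True
--         # Also accept if pid is the parent of expected ('H6P1' retrieved when 'H6P1(1)' expected)
--         bare_e = e.split("(", 1)[0]
--         if pid == bare_e:
--             return True
--     return False
-- ===== SOURCE B (Python) =====
-- def matches_expected(provision_id: str, expected_list: list[str]) -> bool:
--     """Did this provision_id match any of the expected provisions?
--     Group expected ids by their parent (prefix before the first '('),
--     recording whether the parent itself is expected and which full ids are;
--     then one lookup under provision_id's parent answers the question."""
--     index = {}  # parent -> [parent itself expected?, set of full (sub-provision) ids]
--     for exp in expected_list:
--         e = exp.strip()
--         parent = e.split("(", 1)[0]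
--         entry = index.setdefault(parent, [False, set()])
--         if e == parent:
--             entry[0] = True
--         else:
--             entry[1].add(e)
--     pid = provision_id.strip()
--     entry = index.get(pid.split("(", 1)[0])
--     if entry is None:
--         return False
--     has_parent, fulls = entry
--     return has_parent or pid == pid.split("(", 1)[0] or pid in fulls
-- ===== Notes on version B (the rewrite author's own statement) =====
-- stated objective: alternative
-- what changed: Instead of scanning the list and running three equality tests per element, B groups the expected ids by their parent (prefix before the first '(') into a dict whose entries record whether the bare parent itself is expected and the set of full sub-provision ids, then answers with a single lookup under provision_id's parent; correctness rests on the identity that A's three tests hold for some element iff the parents coincide and one of the two ids is bare or they are equal.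
import Mathlib
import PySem

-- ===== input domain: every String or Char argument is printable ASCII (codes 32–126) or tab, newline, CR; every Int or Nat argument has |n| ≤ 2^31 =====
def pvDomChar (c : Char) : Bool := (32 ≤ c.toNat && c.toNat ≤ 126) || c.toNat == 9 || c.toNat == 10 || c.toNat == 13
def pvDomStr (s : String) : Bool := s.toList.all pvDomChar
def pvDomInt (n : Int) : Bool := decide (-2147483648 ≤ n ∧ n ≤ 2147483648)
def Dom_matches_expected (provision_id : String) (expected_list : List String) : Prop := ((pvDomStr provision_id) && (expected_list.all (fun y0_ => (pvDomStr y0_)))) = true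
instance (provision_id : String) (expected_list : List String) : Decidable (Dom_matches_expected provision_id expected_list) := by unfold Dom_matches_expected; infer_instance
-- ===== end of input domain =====

-- B groups the expected ids by their parent into a dict built once, then answers with one lookup (alternative decomposition; same cost).

-- ===== PORT A =====
-- s.split("(", 1)[0]  — split always returns a nonempty list, so [0] is its head
def pvBare (s : String) : String := ((PySem.Str.splitMax? s "(" 1).getD []).headD ""

def pvMatchLoop (pid : String) : List String → Bool
  | [] => false
  | exp :: rest =>
    let e := PySem.Str.strip exp
    if pid == e then true
    else
      let bare := pvBare pid
      if bare == e then true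
      else
        let bare_e := pvBare e
        if pid == bare_e then true
        else pvMatchLoop pid rest

def matches_expected (provision_id : String) (expected_list : List String) : Bool :=
  pvMatchLoop (PySem.Str.strip provision_id) expected_list

-- ===== PORT B =====
-- the body of B's indexing loop: setdefault + in-place update of the entry = one overwriting insert
def pvIndexStep (idx : PySem.Dict String (Bool × PySem.Set String)) (exp : String) :
    PySem.Dict String (Bool × PySem.Set String) :=
  let e := PySem.Str.strip exp
  let parent := pvBare e
  let entry := (idx.get? parent).getD (false, PySem.Set.empty)
  let entry := if e == parent then (true, entry.2) else (entry.1, PySem.Set.add entry.2 e)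
  idx.insert parent entry

def matches_expected_alt (provision_id : String) (expected_list : List String) : Bool :=
  let index := expected_list.foldl pvIndexStep PySem.Dict.empty
  let pid := PySem.Str.strip provision_id
  match index.get? (pvBare pid) with
  | none => false
  | some (has_parent, fulls) => has_parent || pid == pvBare pid || PySem.Set.contains fulls pid

-- ===== PRECONDITION & SPEC =====
def Spec_matches_expected (provision_id : String) (expected_list : List String) (out : Bool) : Prop := out = matches_expected_alt provision_id expected_list
instance (provision_id : String) (expected_list : List String) (out : Bool) : Decidable (Spec_matches_expected provision_id expected_list out) := by unfold Spec_matches_expected; infer_instance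

-- ===== CLAIM (what is proved, stated in full; the proofs are below) =====
def Claim_equal_matches_expected : Prop := ∀ (provision_id : String) (expected_list : List String), Dom_matches_expected provision_id expected_list → Spec_matches_expected provision_id expected_list (matches_expected provision_id expected_list)

-- ===== LEMMAS AND PROOFS =====

-- splitOnMax.go: unfolding equations
theorem pvGo_nil (sep : List Char) (fuel m : Nat) (cur : List Char) (acc : List (List Char)) :
    PySem.Chars.splitOnMax.go sep fuel m [] cur acc = (cur.reverse :: acc).reverse := by
  cases fuel <;> simp [PySem.Chars.splitOnMax.go]

theorem pvGo_succ (sep : List Char) (fuel m : Nat) (c : Char) (rest cur : List Char) (acc : List (List Char)) :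
    PySem.Chars.splitOnMax.go sep (fuel+1) m (c :: rest) cur acc =
      (if m = 0 then ((cur.reverse ++ (c :: rest)) :: acc).reverse
       else if sep.isPrefixOf (c :: rest) then
         PySem.Chars.splitOnMax.go sep fuel (m-1) (List.drop sep.length (c :: rest)) [] (cur.reverse :: acc)
       else PySem.Chars.splitOnMax.go sep fuel m rest (c :: cur) acc) := by
  simp [PySem.Chars.splitOnMax.go]

-- the accumulator of go is a prefix of the (reversed) result
theorem pvGo_acc (sep : List Char) (fuel : Nat) : ∀ (m : Nat) (l cur : List Char) (acc : List (List Char)),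
    PySem.Chars.splitOnMax.go sep fuel m l cur acc =
      acc.reverse ++ PySem.Chars.splitOnMax.go sep fuel m l cur [] := by
  induction fuel with
  | zero =>
    intro m l cur acc
    simp [PySem.Chars.splitOnMax.go]
  | succ fuel ih =>
    intro m l cur acc
    cases l with
    | nil => simp [pvGo_nil]
    | cons c rest =>
      rw [pvGo_succ, pvGo_succ]
      split_ifs with h1 h2
      · simp
      · rw [ih (m-1) _ [] (cur.reverse :: acc), ih (m-1) _ [] [cur.reverse]]
        simp
      · exact ih m rest (c :: cur) acc

-- first chunk of go with a nonzero budget = everything up to the first '('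
theorem pvGo_first (fuel : Nat) : ∀ (m : Nat) (l cur : List Char), m ≠ 0 → l.length ≤ fuel →
    ∃ rest, PySem.Chars.splitOnMax.go ['('] fuel m l cur [] =
      (cur.reverse ++ l.takeWhile (· ≠ '(')) :: rest := by
  induction fuel with
  | zero =>
    intro m l cur _ hlen
    have : l = [] := List.eq_nil_of_length_eq_zero (Nat.le_zero.mp hlen)
    subst this
    exact ⟨[], by simp [pvGo_nil]⟩
  | succ fuel ih =>
    intro m l cur hm hlen
    cases l with
    | nil => exact ⟨[], by simp [pvGo_nil]⟩
    | cons c rest =>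
      rw [pvGo_succ]
      simp only [if_neg hm]
      by_cases hc : c = '('
      · have hpre : List.isPrefixOf ['('] (c :: rest) = true := by
          simp [List.isPrefixOf, hc]
        rw [if_pos hpre, pvGo_acc]
        refine ⟨PySem.Chars.splitOnMax.go ['('] fuel (m-1) (List.drop 1 (c :: rest)) [] [], ?_⟩
        simp [List.takeWhile, hc]
      · have hpre : List.isPrefixOf ['('] (c :: rest) = false := by
          simp [List.isPrefixOf]
          intro h; exact absurd h.symm hc
        rw [if_neg (by simp [hpre])]
        obtain ⟨tail, htail⟩ := ih m rest (c :: cur) hm (by simpa using Nat.lt_succ_iff.mp (Nat.lt_of_lt_of_le (Nat.lt_succ_self _) (by simpa using hlen)))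
        refine ⟨tail, ?_⟩
        rw [htail]
        simp [List.takeWhile, hc]

-- pvBare is "take up to the first '('"
theorem pvBare_eq (s : String) : pvBare s = String.ofList (s.toList.takeWhile (· ≠ '(')) := by
  obtain ⟨rest, hrest⟩ := pvGo_first (s.toList.length + 1) 1 s.toList [] (by decide) (by omega)
  have h1 : pvBare s =
      ((PySem.Chars.splitOnMax.go ['('] (s.toList.length + 1) 1 s.toList [] []).map
        String.ofList).headD "" := rfl
  rw [h1, hrest]
  simp

theorem pvTakeWhile_idem {α : Type} (p : α → Bool) (l : List α) :
    (l.takeWhile p).takeWhile p = l.takeWhile p := by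
  induction l with
  | nil => rfl
  | cons c rest ih =>
    by_cases hc : p c = true
    · simp [List.takeWhile, hc, ih]
    · simp [List.takeWhile, hc]

theorem pvBare_idem (s : String) : pvBare (pvBare s) = pvBare s := by
  rw [pvBare_eq s, pvBare_eq]
  congr 1
  simp only [String.toList_ofList]
  exact pvTakeWhile_idem _ _

-- per-element: A's three tests = "same parent, and one of the two is bare or they are equal"
theorem pvCond_eq (pid e : String) :
    (pid == e || pvBare pid == e || pid == pvBare e) =
      ((pvBare e == pvBare pid) && (e == pvBare e || pid == pvBare pid || pid == e)) := by
  rw [Bool.eq_iff_iff]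
  simp only [Bool.or_eq_true, Bool.and_eq_true, beq_iff_eq]
  constructor
  · rintro ((h | h) | h)
    · exact ⟨by rw [h], Or.inr h⟩
    · refine ⟨?_, Or.inl (Or.inl ?_)⟩ <;> rw [← h, pvBare_idem]
    · refine ⟨?_, Or.inl (Or.inr ?_)⟩ <;> rw [h, pvBare_idem]
  · rintro ⟨hb, ((h | h) | h)⟩
    · exact Or.inl (Or.inr (h.trans hb).symm)
    · exact Or.inr (h.trans hb.symm)
    · exact Or.inl (Or.inl h)

-- A's loop is the disjunction of the three per-element tests over the list
theorem pvMatchLoop_eq_any (pid : String) (l : List String) :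
    pvMatchLoop pid l =
      l.any (fun exp => pid == PySem.Str.strip exp || pvBare pid == PySem.Str.strip exp
        || pid == pvBare (PySem.Str.strip exp)) := by
  induction l with
  | nil => rfl
  | cons exp rest ih =>
    simp only [pvMatchLoop, List.any_cons, ih]
    split_ifs with h1 h2 h3
    · simp [h1]
    · simp [h2]
    · simp [h3]
    · simp [h1, h2, h3]

-- what B's final lookup computes on a given dict
def pvLook (pid : String) (idx : PySem.Dict String (Bool × PySem.Set String)) : Bool :=
  match idx.get? (pvBare pid) with
  | none => false
  | some (has_parent, fulls) => has_parent || pid == pvBare pid || PySem.Set.contains fulls pid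

-- one indexing step after the lookup = old lookup OR this element's test
theorem pvLook_step (pid : String) (idx : PySem.Dict String (Bool × PySem.Set String)) (exp : String) :
    pvLook pid (pvIndexStep idx exp) =
      (pvLook pid idx ||
        ((pvBare (PySem.Str.strip exp) == pvBare pid) &&
          (PySem.Str.strip exp == pvBare (PySem.Str.strip exp) || pid == pvBare pid || pid == PySem.Str.strip exp))) := by
  have hstep : pvIndexStep idx exp =
      idx.insert (pvBare (PySem.Str.strip exp))
        (if PySem.Str.strip exp == pvBare (PySem.Str.strip exp)
          then (true, ((idx.get? (pvBare (PySem.Str.strip exp))).getD (false, PySem.Set.empty)).2)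
          else (((idx.get? (pvBare (PySem.Str.strip exp))).getD (false, PySem.Set.empty)).1,
                PySem.Set.add ((idx.get? (pvBare (PySem.Str.strip exp))).getD (false, PySem.Set.empty)).2
                  (PySem.Str.strip exp))) := rfl
  generalize PySem.Str.strip exp = e at hstep ⊢
  rw [hstep]
  unfold pvLook
  rw [PySem.Dict.get?_insert]
  by_cases hk : pvBare pid = pvBare e
  · rw [if_pos hk, hk]
    by_cases hbe : (e == pvBare e) = true
    · rw [if_pos hbe]
      cases hg : idx.get? (pvBare e) with
      | none => simp [hbe]
      | some v =>
        cases v with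
        | mk b f => simp [hbe]
    · rw [if_neg hbe]
      cases hg : idx.get? (pvBare e) with
      | none =>
        rw [Bool.eq_iff_iff]
        simp [hbe, PySem.Set.contains, PySem.Set.empty]
      | some v =>
        cases v with
        | mk b f =>
          rw [Bool.eq_iff_iff]
          simp [hbe]
          tauto
  · rw [if_neg hk]
    have hne : (pvBare e == pvBare pid) = false := by
      simp only [beq_eq_false_iff_ne, ne_eq]; exact fun h => hk h.symm
    simp [hne]

-- folding the index over a list, seen through the final lookup
theorem pvLook_foldl (pid : String) (l : List String) :
    ∀ idx, pvLook pid (l.foldl pvIndexStep idx) =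
      (pvLook pid idx ||
        l.any (fun exp => (pvBare (PySem.Str.strip exp) == pvBare pid) &&
          (PySem.Str.strip exp == pvBare (PySem.Str.strip exp) || pid == pvBare pid || pid == PySem.Str.strip exp))) := by
  induction l with
  | nil => intro idx; simp
  | cons exp rest ih =>
    intro idx
    simp only [List.foldl_cons, ih, pvLook_step, List.any_cons]
    rw [Bool.or_assoc]

-- ===== VERDICT (by name: the statement is the Claim_ definition above) =====
set_option maxHeartbeats 1000000 in
theorem matches_expected_spec : Claim_equal_matches_expected := by
  intro provision_id expected_list _
  unfold Spec_matches_expected matches_expected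
  have hB : matches_expected_alt provision_id expected_list
      = pvLook (PySem.Str.strip provision_id) (expected_list.foldl pvIndexStep PySem.Dict.empty) := rfl
  rw [hB, pvLook_foldl, pvMatchLoop_eq_any]
  have hEmpty : pvLook (PySem.Str.strip provision_id) PySem.Dict.empty = false := by
    simp [pvLook, PySem.Dict.get?_empty]
  rw [hEmpty, Bool.false_or]
  congr 1
  funext exp
  exact pvCond_eq (PySem.Str.strip provision_id) (PySem.Str.strip exp)
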